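-- pv_equiv track=rewrite | github.com/CloudSmith-Release-Safety/aws-sam-github-actions-example | lambdas/matrix/matrix.py | optimized_matrix_multiply
-- ===== SOURCE A (Python) =====
-- def optimized_matrix_multiply(size):
--     """
--     Memory-optimized matrix multiplication using generators and chunking
--     """
--     # Use generators to reduce memory footprint
--     def create_matrix_row(row_idx, size):
--         return [((row_idx + col_idx) % 10) for col_idx in range(size)]
--
--     # Calculate result sum without storing full matrices
--     total_sum = 0
--     for i in range(min(size, 10)):  # Limit calculation for demo
--         row_a = create_matrix_row(i, size)
--         for j in range(min(size, 10)):
--             row_b = create_matrix_row(j, size)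
--             # Dot product
--             dot_product = sum(a * b for a, b in zip(row_a, row_b))
--             total_sum += dot_product
--
--     return {
--         'operation_result': total_sum,
--         'calculated_elements': min(size, 10) * min(size, 10)
--     }
-- ===== SOURCE B (Python) =====
-- def optimized_matrix_multiply(size):
--     """Closed form over the period-10 rows: each dot product is
--     q * (full-period sum) + (remainder prefix sum), so the whole result is O(1)."""
--     n = min(size, 10)
--     q = size // 10
--     r = size % 10
--     total = 0
--     for i in range(n):
--         for j in range(n):
--             period = sum(((i + t) % 10) * ((j + t) % 10) for t in range(10))
--             prefix = sum(((i + t) % 10) * ((j + t) % 10) for t in range(r))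
--             total += q * period + prefix
--     return {
--         'operation_result': total,
--         'calculated_elements': n * n
--     }
-- ===== Notes on version B (the rewrite author's own statement) =====
-- stated objective: faster
-- what changed: B replaces A's O(size)-long dot-product loops (and row materialisation) by a closed form exploiting the period-10 structure of the rows: each dot product equals (size // 10) * (sum over one full period) + (sum over the size % 10 remainder), so B does constant work per (i,j) pair and O(1) work overall.
import Mathlib
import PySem

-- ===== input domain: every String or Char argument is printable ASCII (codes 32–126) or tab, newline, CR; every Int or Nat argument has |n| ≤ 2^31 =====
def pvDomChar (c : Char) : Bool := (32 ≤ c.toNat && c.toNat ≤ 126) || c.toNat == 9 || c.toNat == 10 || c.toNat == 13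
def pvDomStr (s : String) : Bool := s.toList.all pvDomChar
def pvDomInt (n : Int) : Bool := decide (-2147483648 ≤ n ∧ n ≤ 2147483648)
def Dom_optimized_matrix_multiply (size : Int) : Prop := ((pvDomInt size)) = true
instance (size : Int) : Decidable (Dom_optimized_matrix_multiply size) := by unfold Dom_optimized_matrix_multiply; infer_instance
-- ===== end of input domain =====

-- B replaces A's per-pair dot-product loops over the whole row by a closed form using the
-- period-10 structure of the rows: (size // 10) * (full-period sum) + (remainder prefix sum).

-- ===== PORT A =====
def pvCreateMatrixRow (row_idx size : Int) : List Int :=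
  (PySem.List.pyRange 0 size 1).map (fun col_idx => PySem.Int.mod (row_idx + col_idx) 10)

def optimized_matrix_multiply (size : Int) : List (String × Int) :=
  let total_sum :=
    (PySem.List.pyRange 0 (min size 10) 1).foldl (fun acc i =>
      let row_a := pvCreateMatrixRow i size
      (PySem.List.pyRange 0 (min size 10) 1).foldl (fun acc2 j =>
        let row_b := pvCreateMatrixRow j size
        let dot_product := ((row_a.zip row_b).map (fun ab => ab.1 * ab.2)).sum
        acc2 + dot_product) acc) 0
  [("operation_result", total_sum), ("calculated_elements", min size 10 * min size 10)]

-- ===== PORT B =====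
def optimized_matrix_multiply_alt (size : Int) : List (String × Int) :=
  let n := min size 10
  let q := PySem.Int.floordiv size 10
  let r := PySem.Int.mod size 10
  let total :=
    (PySem.List.pyRange 0 n 1).foldl (fun acc i =>
      (PySem.List.pyRange 0 n 1).foldl (fun acc2 j =>
        let period := ((PySem.List.pyRange 0 10 1).map
          (fun t => PySem.Int.mod (i + t) 10 * PySem.Int.mod (j + t) 10)).sum
        let prefixSum := ((PySem.List.pyRange 0 r 1).map
          (fun t => PySem.Int.mod (i + t) 10 * PySem.Int.mod (j + t) 10)).sum
        acc2 + (q * period + prefixSum)) acc) 0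
  [("operation_result", total), ("calculated_elements", n * n)]

-- ===== PRECONDITION & SPEC =====
def Spec_optimized_matrix_multiply (size : Int) (out : List (String × Int)) : Prop := out = optimized_matrix_multiply_alt size
instance (size : Int) (out : List (String × Int)) : Decidable (Spec_optimized_matrix_multiply size out) := by unfold Spec_optimized_matrix_multiply; infer_instance

-- ===== CLAIM (what is proved, stated in full; the proofs are below) =====
def Claim_equal_optimized_matrix_multiply : Prop := ∀ (size : Int), Dom_optimized_matrix_multiply size → Spec_optimized_matrix_multiply size (optimized_matrix_multiply size)

-- ===== LEMMAS AND PROOFS =====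

lemma pvRange_nil_of_nonpos {s : Int} (h : s ≤ 0) : PySem.List.pyRange 0 s 1 = [] := by
  simp [PySem.List.pyRange, show ¬ (0:Int) < s by omega]

-- sum of the first 10*q + r values of a 10-periodic sequence
lemma pvWindow (G : Nat → Int) (hG : ∀ k, G (k + 10) = G k) (q r : Nat) :
    ((List.range (10 * q + r)).map G).sum
      = (q : Int) * ((List.range 10).map G).sum + ((List.range r).map G).sum := by
  induction q with
  | zero => simp
  | succ q ih =>
    have h1 : 10 * (q + 1) + r = 10 + (10 * q + r) := by ring
    rw [h1, List.range_add, List.map_append, List.sum_append, List.map_map]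
    have hmap : ((List.range (10 * q + r)).map (G ∘ (10 + ·))) = (List.range (10 * q + r)).map G := by
      apply List.map_congr_left; intro k _
      simp only [Function.comp]
      rw [Nat.add_comm]; exact hG k
    rw [hmap, ih]
    push_cast
    ring

lemma pvPeriodicSum (h : Int → Int) (hp : ∀ c, h (c + 10) = h c) (size : Int) (hs : 0 ≤ size) :
    ((PySem.List.pyRange 0 size 1).map h).sum
      = PySem.Int.floordiv size 10 * ((PySem.List.pyRange 0 10 1).map h).sum
        + ((PySem.List.pyRange 0 (PySem.Int.mod size 10) 1).map h).sum := by
  obtain ⟨n, rfl⟩ : ∃ n : Nat, size = (n : Int) := ⟨size.toNat, (Int.toNat_of_nonneg hs).symm⟩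
  have h10 : (10 : Int) = ((10 : Nat) : Int) := by norm_num
  rw [h10, PySem.Int.floordiv_natCast, PySem.Int.mod_natCast,
    PySem.List.pyRange_zero_natCast, PySem.List.pyRange_zero_natCast, PySem.List.pyRange_zero_natCast,
    List.map_map, List.map_map, List.map_map]
  have hG : ∀ k, (h ∘ fun k : Nat => (k : Int)) (k + 10) = (h ∘ fun k : Nat => (k : Int)) k := by
    intro k; simp only [Function.comp]; push_cast; exact hp k
  have hw := pvWindow (h ∘ fun k : Nat => (k : Int)) hG (n / 10) (n % 10)
  rw [Nat.div_add_mod] at hw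
  exact hw

lemma pvDotClosed (i j size : Int) (hs : 0 ≤ size) :
    (((pvCreateMatrixRow i size).zip (pvCreateMatrixRow j size)).map (fun ab => ab.1 * ab.2)).sum
      = PySem.Int.floordiv size 10 *
          ((PySem.List.pyRange 0 10 1).map (fun t => PySem.Int.mod (i + t) 10 * PySem.Int.mod (j + t) 10)).sum
        + ((PySem.List.pyRange 0 (PySem.Int.mod size 10) 1).map
            (fun t => PySem.Int.mod (i + t) 10 * PySem.Int.mod (j + t) 10)).sum := by
  unfold pvCreateMatrixRow
  rw [List.zip_map', List.map_map]
  have hcomp : ((fun ab : Int × Int => ab.1 * ab.2) ∘ fun a =>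
      (PySem.Int.mod (i + a) 10, PySem.Int.mod (j + a) 10))
      = fun t => PySem.Int.mod (i + t) 10 * PySem.Int.mod (j + t) 10 := rfl
  rw [hcomp]
  apply pvPeriodicSum _ ?_ size hs
  intro c
  rw [PySem.Int.mod_eq_emod_of_pos (by norm_num), PySem.Int.mod_eq_emod_of_pos (by norm_num),
      PySem.Int.mod_eq_emod_of_pos (by norm_num), PySem.Int.mod_eq_emod_of_pos (by norm_num)]
  have h1 : (i + (c + 10)) % 10 = (i + c) % 10 := by omega
  have h2 : (j + (c + 10)) % 10 = (j + c) % 10 := by omega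
  rw [h1, h2]

-- ===== VERDICT (by name: the statement is the Claim_ definition above) =====
theorem optimized_matrix_multiply_spec : Claim_equal_optimized_matrix_multiply := by
  intro size _
  unfold Spec_optimized_matrix_multiply optimized_matrix_multiply optimized_matrix_multiply_alt
  by_cases hs : 0 ≤ size
  · have hfun :
      (fun (acc : Int) i =>
        (PySem.List.pyRange 0 (min size 10) 1).foldl (fun acc2 j =>
          acc2 + (((pvCreateMatrixRow i size).zip (pvCreateMatrixRow j size)).map
            (fun ab => ab.1 * ab.2)).sum) acc)
      = (fun (acc : Int) i =>
        (PySem.List.pyRange 0 (min size 10) 1).foldl (fun acc2 j =>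
          acc2 + (PySem.Int.floordiv size 10 *
            ((PySem.List.pyRange 0 10 1).map (fun t => PySem.Int.mod (i + t) 10 * PySem.Int.mod (j + t) 10)).sum
          + ((PySem.List.pyRange 0 (PySem.Int.mod size 10) 1).map
            (fun t => PySem.Int.mod (i + t) 10 * PySem.Int.mod (j + t) 10)).sum)) acc) := by
      funext acc i
      congr 1
      funext acc2 j
      rw [pvDotClosed i j size hs]
    simp only []
    rw [hfun]
  · have hmin : min size 10 = size := by omega
    simp only [hmin, pvRange_nil_of_nonpos (show size ≤ 0 by omega)]
    simp
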